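-- pv_equiv track=rewrite | github.com/RealForce1024/flask-echarts | test.py | split_v4
-- ===== SOURCE A (Python) =====
-- def split_v4(list):
--     length = len(list)
--     collection = []
--     index = 0
--     for i in range(length - 1):
--         lst = []
--         i = i + index
--         for j in range(length - 1 - i):
--             if list[j] == list[j + 1]:
--                 lst.append(list[j])
--                 index = index + 1
--             else:
--                 break
--         collection.append(lst)
--     return collection
-- ===== SOURCE B (Python) =====
-- def split_v4(list):
--     # One prefix scan computes P, the length of the leading adjacent-equal run;
--     # the inner re-scan of A is replaced by per-iteration arithmetic min(bound, P).
--     length = len(list)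
--     P = 0
--     while P < length - 1 and list[P] == list[P + 1]:
--         P += 1
--     collection = []
--     index = 0
--     for i in range(length - 1):
--         bound = length - 1 - i - index
--         c = min(bound, P) if bound > 0 else 0
--         collection.append(list[:c])
--         index += c
--     return collection
-- ===== Notes on version B (the rewrite author's own statement) =====
-- stated objective: alternative
-- what changed: A re-scans the list's leading equal run from index 0 inside every outer iteration; B computes the run length P once with a single prefix scan and replaces the inner loop by per-iteration arithmetic c = min(bound, P), appending list[:c].
import Mathlib
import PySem

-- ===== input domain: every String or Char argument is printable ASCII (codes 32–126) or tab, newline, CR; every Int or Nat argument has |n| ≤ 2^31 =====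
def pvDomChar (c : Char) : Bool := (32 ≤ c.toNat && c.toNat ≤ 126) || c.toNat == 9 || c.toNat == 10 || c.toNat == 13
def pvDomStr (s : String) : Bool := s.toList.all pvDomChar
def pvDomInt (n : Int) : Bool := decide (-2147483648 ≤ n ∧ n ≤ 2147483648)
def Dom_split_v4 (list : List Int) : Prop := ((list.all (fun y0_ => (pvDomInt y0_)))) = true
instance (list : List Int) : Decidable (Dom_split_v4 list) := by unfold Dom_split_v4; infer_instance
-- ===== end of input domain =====

-- B replaces A's inner re-scan of the leading equal run by one precomputed run length P
-- and per-iteration arithmetic min(bound, P) (objective: simpler; same return value).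

-- ===== PORT A =====
-- inner loop: for j in range(n): if list[j]==list[j+1]: lst.append(list[j]); index+=1 else break
def pvRunA (l : List Int) : Nat → Nat → List Int → Nat → List Int × Nat
  | 0, _, lst, index => (lst, index)
  | n + 1, j, lst, index =>
    if l.getD j 0 == l.getD (j + 1) 0 then
      pvRunA l n (j + 1) (lst ++ [l.getD j 0]) (index + 1)
    else (lst, index)

-- outer loop: for i in range(length-1): i = i + index; inner loop; collection.append(lst)
def pvOuterA (l : List Int) : List Nat → Nat → List (List Int) → List (List Int)
  | [], _, coll => coll
  | i :: rest, index, coll =>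
    let i' := i + index
    let r := pvRunA l (l.length - 1 - i') 0 [] index
    pvOuterA l rest r.2 (coll ++ [r.1])

def split_v4 (list : List Int) : List (List Int) :=
  pvOuterA list (List.range (list.length - 1)) 0 []

-- ===== PORT B =====
-- while P < length-1 and list[P] == list[P+1]: P += 1
def pvPrefB (l : List Int) (p : Nat) : Nat :=
  if _h : p < l.length - 1 then
    if l.getD p 0 == l.getD (p + 1) 0 then pvPrefB l (p + 1) else p
  else p
termination_by l.length - 1 - p

-- for i in range(length-1): bound = length-1-i-index; c = min(bound,P) if bound>0 else 0; append list[:c]; index += c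
def pvOuterB (l : List Int) (P : Nat) : List Nat → Nat → List (List Int) → List (List Int)
  | [], _, coll => coll
  | i :: rest, index, coll =>
    let bound : Int := (l.length : Int) - 1 - (i : Int) - (index : Int)
    let c : Int := if bound > 0 then min bound (P : Int) else 0
    pvOuterB l P rest (index + c.toNat) (coll ++ [l.take c.toNat])

def split_v4_alt (list : List Int) : List (List Int) :=
  pvOuterB list (pvPrefB list 0) (List.range (list.length - 1)) 0 []

-- ===== PRECONDITION & SPEC =====
def Spec_split_v4 (list : List Int) (out : List (List Int)) : Prop := out = split_v4_alt list
instance (list : List Int) (out : List (List Int)) : Decidable (Spec_split_v4 list out) := by unfold Spec_split_v4; infer_instance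

-- ===== CLAIM (what is proved, stated in full; the proofs are below) =====
def Claim_equal_split_v4 : Prop := ∀ (list : List Int), Dom_split_v4 list → Spec_split_v4 list (split_v4 list)

-- ===== LEMMAS AND PROOFS =====

-- number of leading adjacent-equal pairs
def pvCnt : List Int → Nat
  | a :: b :: t => if a = b then pvCnt (b :: t) + 1 else 0
  | _ => 0

theorem pvCnt_le : ∀ (l : List Int), pvCnt l ≤ l.length - 1 := by
  intro l
  induction l with
  | nil => simp [pvCnt]
  | cons a t ih =>
    cases t with
    | nil => simp [pvCnt]
    | cons b t' =>
      simp only [pvCnt]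
      split
      · simp only [List.length_cons] at ih ⊢
        omega
      · omega

theorem pvPrefB_eq : ∀ (l : List Int) (p : Nat), pvPrefB l p = p + pvCnt (l.drop p) := by
  intro l p
  induction hn : l.length - 1 - p generalizing p with
  | zero =>
    unfold pvPrefB
    have hp : ¬ p < l.length - 1 := by omega
    simp only [hp, dif_neg, not_false_iff]
    have : (l.drop p).length ≤ 1 := by simp; omega
    cases hd : l.drop p with
    | nil => simp [pvCnt]
    | cons a t =>
      cases t with
      | nil => simp [pvCnt]
      | cons b t' => rw [hd] at this; simp at this
  | succ n ih =>
    unfold pvPrefB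
    have hp : p < l.length - 1 := by omega
    simp only [hp, dif_pos]
    have hplen : p < l.length := by omega
    have hp1len : p + 1 < l.length := by omega
    have hd : l.drop p = l[p] :: l[p+1] :: l.drop (p + 2) := by
      rw [List.drop_eq_getElem_cons hplen]
      congr 1
      rw [List.drop_eq_getElem_cons hp1len]
    have hg1 : l.getD p 0 = l[p] := List.getD_eq_getElem l 0 hplen
    have hg2 : l.getD (p + 1) 0 = l[p+1] := List.getD_eq_getElem l 0 hp1len
    rw [hg1, hg2]
    by_cases he : l[p] = l[p+1]
    · simp only [he, beq_self_eq_true, if_true]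
      rw [ih (p + 1) (by omega)]
      rw [hd, pvCnt]
      have hd2 : l.drop (p + 1) = l[p+1] :: l.drop (p + 2) := by
        rw [List.drop_eq_getElem_cons hp1len]
      rw [hd2]
      simp [he]
      omega
    · have : (l[p] == l[p+1]) = false := by simp [he]
      rw [this]
      simp only [Bool.false_eq_true, if_false]
      rw [hd, pvCnt]
      simp [he]

-- A's inner loop computes take (min n (pvCnt s)) of the suffix s = l.drop j
theorem pvRunA_eq : ∀ (l : List Int) (n j : Nat) (lst : List Int) (index : Nat),
    n + j + 1 ≤ l.length →
    pvRunA l n j lst index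
      = (lst ++ (l.drop j).take (min n (pvCnt (l.drop j))), index + min n (pvCnt (l.drop j))) := by
  intro l n
  induction n with
  | zero => intro j lst index _; simp [pvRunA]
  | succ n ih =>
    intro j lst index hlen
    have hplen : j < l.length := by omega
    have hp1len : j + 1 < l.length := by omega
    have hd : l.drop j = l[j] :: l[j+1] :: l.drop (j + 2) := by
      rw [List.drop_eq_getElem_cons hplen]
      congr 1
      rw [List.drop_eq_getElem_cons hp1len]
    have hd2 : l.drop (j + 1) = l[j+1] :: l.drop (j + 2) := by
      rw [List.drop_eq_getElem_cons hp1len]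
    have hg1 : l.getD j 0 = l[j] := List.getD_eq_getElem l 0 hplen
    have hg2 : l.getD (j + 1) 0 = l[j+1] := List.getD_eq_getElem l 0 hp1len
    unfold pvRunA
    rw [hg1, hg2]
    by_cases he : l[j] = l[j+1]
    · simp only [he, beq_self_eq_true, if_true]
      rw [ih (j + 1) (lst ++ [l[j+1]]) (index + 1) (by omega)]
      rw [hd, hd2, pvCnt]
      simp only [he, if_true, Prod.mk.injEq]
      refine ⟨?_, by omega⟩
      rw [Nat.succ_min_succ, List.take_succ_cons]
      simp
    · have hbe : (l[j] == l[j+1]) = false := by simp [he]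
      rw [hbe]
      simp only [Bool.false_eq_true, if_false]
      rw [hd, pvCnt]
      simp [he]

theorem pvOuter_eq : ∀ (l : List Int) (is : List Nat) (index : Nat) (coll : List (List Int)),
    1 ≤ l.length →
    pvOuterA l is index coll = pvOuterB l (pvPrefB l 0) is index coll := by
  intro l is
  induction is with
  | nil => intro index coll _; simp [pvOuterA, pvOuterB]
  | cons i rest ih =>
    intro index coll hlen
    have hP : pvPrefB l 0 = pvCnt l := by rw [pvPrefB_eq]; simp
    have hPle : pvCnt l ≤ l.length - 1 := pvCnt_le l
    simp only [pvOuterA, pvOuterB]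
    rw [pvRunA_eq l (l.length - 1 - (i + index)) 0 [] index (by omega)]
    simp only [List.drop_zero, List.nil_append, hP]
    have hc : (if ((l.length : Int) - 1 - (i : Int) - (index : Int)) > 0
              then min ((l.length : Int) - 1 - (i : Int) - (index : Int)) ((pvCnt l : Int))
              else 0).toNat = min (l.length - 1 - (i + index)) (pvCnt l) := by
      split <;> omega
    rw [hc]
    rw [hP] at ih
    exact ih _ _ hlen
theorem split_v4_spec : Claim_equal_split_v4 := by
  intro list _
  unfold Spec_split_v4 split_v4 split_v4_alt
  cases hl : list with
  | nil => simp [pvOuterA, pvOuterB]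
  | cons a t =>
    rw [← hl]
    exact pvOuter_eq list _ 0 [] (by rw [hl]; simp)
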